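-- pv_equiv track=rewrite | github.com/6puritans9/codetree-TILs | 250320/아름다운 수열 2/beautiful-sequence-2.py | find_matching_counts
-- ===== SOURCE A (Python) =====
-- from collections import deque
--
-- def compare(m: int, seq_b: list[int], subarr: list[int]) -> bool:
--     # TC = O(M)
--     # SC = O(1)
--
--     for number in subarr:
--         did_match = False
--
--         for target in seq_b:
--             if number == target:
--                 did_match = True
--
--         if not did_match:
--             return False
--
--     return True
--
-- def find_matching_counts(n: int, m: int, seq_a: list[int], seq_b: list[int]) -> int:
--     # TC = O(N)
--     # SC = O(M)
--
--     counts = 0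
--     subarr = deque()
--
--     left = 0
--     for right in range(n):
--         subarr.append(seq_a[right])
--
--         if right - left > m - 1:
--             subarr.popleft()
--             left += 1
--
--         if right - left == m - 1:
--             counts += 1 if compare(m, seq_b, subarr) else 0
--
--
--     return counts
-- ===== SOURCE B (Python) =====
-- def find_matching_counts(n: int, m: int, seq_a: list[int], seq_b: list[int]) -> int:
--     # Run-length method: a window of size m ending at `right` is fully matched
--     # iff the current run of consecutive members of seq_b has length >= m.
--     if m < 0:
--         return 0
--     members = set(seq_b)
--     counts = 0
--     run = 0
--     for right in range(n):
--         run = run + 1 if seq_a[right] in members else 0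
--         if run >= m:
--             counts += 1
--     return counts
-- ===== Notes on version B (the rewrite author's own statement) =====
-- stated objective: alternative
-- what changed: Replaces the deque window plus a per-window rescan of the whole window against seq_b with a precomputed membership set and a run-length counter (length of the current streak of members) updated in O(1) per element.
import Mathlib
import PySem

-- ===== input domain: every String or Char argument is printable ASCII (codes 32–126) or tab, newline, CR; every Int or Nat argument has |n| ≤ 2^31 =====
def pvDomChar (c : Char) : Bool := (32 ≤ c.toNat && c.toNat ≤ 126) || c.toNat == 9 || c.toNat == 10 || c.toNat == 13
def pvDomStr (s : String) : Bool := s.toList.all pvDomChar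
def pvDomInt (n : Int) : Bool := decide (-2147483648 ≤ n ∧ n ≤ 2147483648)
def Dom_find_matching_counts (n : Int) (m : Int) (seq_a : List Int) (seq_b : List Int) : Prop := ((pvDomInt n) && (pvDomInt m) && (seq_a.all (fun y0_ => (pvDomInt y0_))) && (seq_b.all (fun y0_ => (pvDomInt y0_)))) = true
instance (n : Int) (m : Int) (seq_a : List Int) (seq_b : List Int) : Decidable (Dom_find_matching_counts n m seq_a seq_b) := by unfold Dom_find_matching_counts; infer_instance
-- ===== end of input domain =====

-- B replaces A's deque window + per-window rescan against seq_b by a membership set and a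
-- run-length counter (current streak of members); return values proved equal on Pre_.


-- ===== PORT A =====
-- helper `compare`: outer loop with early return -> structural recursion; inner loop -> foldl
def pvCompare (m : Int) (seq_b : List Int) : List Int → Bool
  | [] => true
  | number :: rest =>
      let did_match := seq_b.foldl (fun d target => if number = target then true else d) false
      if ¬ did_match then false else pvCompare m seq_b rest

-- loop body of A: state (counts, subarr, left); deque append/popleft = list append/tail
def pvStepA (m : Int) (seq_a : List Int) (seq_b : List Int)
    (st : Int × List Int × Int) (right : Int) : Int × List Int × Int :=
  let counts := st.1
  let subarr := st.2.1 ++ [(PySem.List.pyGet? seq_a right).getD 0]  -- Pre_ keeps the index in range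
  let p := if right - st.2.2 > m - 1 then (subarr.tail, st.2.2 + 1) else (subarr, st.2.2)
  let counts := if right - p.2 = m - 1 then (if pvCompare m seq_b p.1 then counts + 1 else counts) else counts
  (counts, p.1, p.2)

def find_matching_counts (n : Int) (m : Int) (seq_a : List Int) (seq_b : List Int) : Int :=
  ((PySem.List.pyRange 0 n 1).foldl (pvStepA m seq_a seq_b) (0, [], 0)).1

-- ===== PORT B =====
-- loop body of B: state (counts, run)
def pvStepB (m : Int) (seq_a : List Int) (members : PySem.Set Int)
    (st : Int × Int) (right : Int) : Int × Int :=
  let run := if PySem.Set.contains members ((PySem.List.pyGet? seq_a right).getD 0) then st.2 + 1 else 0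
  (if run ≥ m then st.1 + 1 else st.1, run)

def find_matching_counts_alt (n : Int) (m : Int) (seq_a : List Int) (seq_b : List Int) : Int :=
  if m < 0 then 0
  else
    let members := PySem.Set.ofList seq_b
    ((PySem.List.pyRange 0 n 1).foldl (pvStepB m seq_a members) (0, 0)).1

-- ===== PRECONDITION & SPEC =====
-- Pre_ excludes exactly the inputs where A raises IndexError (seq_a[right] with n > len(seq_a)).
def Pre_find_matching_counts (n : Int) (m : Int) (seq_a : List Int) (seq_b : List Int) : Prop :=
  n ≤ (seq_a.length : Int)
instance (n : Int) (m : Int) (seq_a : List Int) (seq_b : List Int) : Decidable (Pre_find_matching_counts n m seq_a seq_b) := by unfold Pre_find_matching_counts; infer_instance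

def pvWitness_find_matching_counts : Int × Int × List Int × List Int := (4, 2, [1, 2, 3, 2], [2, 3])

def Spec_find_matching_counts (n : Int) (m : Int) (seq_a : List Int) (seq_b : List Int) (out : Int) : Prop := out = find_matching_counts_alt n m seq_a seq_b
instance (n : Int) (m : Int) (seq_a : List Int) (seq_b : List Int) (out : Int) : Decidable (Spec_find_matching_counts n m seq_a seq_b out) := by unfold Spec_find_matching_counts; infer_instance

-- ===== CLAIM (what is proved, stated in full; the proofs are below) =====
def Claim_equal_find_matching_counts : Prop := ∀ (n : Int) (m : Int) (seq_a : List Int) (seq_b : List Int), Dom_find_matching_counts n m seq_a seq_b → Pre_find_matching_counts n m seq_a seq_b → Spec_find_matching_counts n m seq_a seq_b (find_matching_counts n m seq_a seq_b)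

-- ===== LEMMAS AND PROOFS =====
def pvMem (seq_b : List Int) : Int → Bool := fun x => decide (x ∈ seq_b)

def pvRgo (p : Int → Bool) : List Int → Nat
  | [] => 0
  | x :: t => if p x then pvRgo p t + 1 else 0

def pvRun (p : Int → Bool) (l : List Int) : Nat := pvRgo p l.reverse

theorem pvRun_append (p : Int → Bool) (l : List Int) (x : Int) :
    pvRun p (l ++ [x]) = if p x then pvRun p l + 1 else 0 := by
  simp [pvRun, pvRgo]

theorem pvRgo_ge (p : Int → Bool) (r : List Int) (j : Nat) :
    j ≤ pvRgo p r ↔ j ≤ r.length ∧ ∀ x ∈ r.take j, p x = true := by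
  induction r generalizing j with
  | nil => cases j <;> simp [pvRgo]
  | cons x t ih =>
    cases j with
    | zero => simp
    | succ j =>
      by_cases hp : p x
      · simp [pvRgo, hp, ih j]
      · simp [pvRgo, hp]

theorem pvRun_ge (p : Int → Bool) (l : List Int) (j : Nat) :
    j ≤ pvRun p l ↔ j ≤ l.length ∧ ∀ x ∈ l.drop (l.length - j), p x = true := by
  rw [pvRun, pvRgo_ge]
  simp only [List.length_reverse]
  refine and_congr_right fun hj => ?_
  rw [List.take_reverse]
  simp
-- compare's inner loop is 'd or (x in seq_b)'
theorem pvInner_eq (x : Int) (b : List Int) (d : Bool) :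
    b.foldl (fun d target => if x = target then true else d) d = (d || decide (x ∈ b)) := by
  induction b generalizing d with
  | nil => simp
  | cons y t ih =>
    rw [List.foldl_cons, ih]
    by_cases h : x = y <;> simp [h]
theorem pvCompare_eq (m : Int) (b : List Int) (l : List Int) :
    pvCompare m b l = l.all (pvMem b) := by
  induction l with
  | nil => rfl
  | cons x t ih =>
    show (if ¬ (b.foldl (fun d target => if x = target then true else d) false) = true then false
          else pvCompare m b t) = _
    rw [pvInner_eq]
    by_cases h : x ∈ b <;> simp [pvMem, h, ih]

def pvCnt (p : Int → Bool) (m' : Nat) (a : List Int) (k : Nat) : Nat :=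
  (List.range k).countP (fun r => decide (m' ≤ pvRun p (a.take (r+1))))

theorem pvRun_le_length (p : Int → Bool) (l : List Int) : pvRun p l ≤ l.length :=
  ((pvRun_ge p l (pvRun p l)).mp le_rfl).1

theorem pvTake_succ (a : List Int) (k : Nat) (h : k < a.length) :
    a.take (k+1) = a.take k ++ [a[k]] := by
  rw [List.take_add_one]
  simp [List.getElem?_eq_getElem h]

theorem pvStepA_inv (m' : Nat) (a b : List Int) (k : Nat) (h : k < a.length) (C : Int) :
    pvStepA (↑m') a b (C, (a.take k).drop (k - m'), ↑(k - m')) ↑k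
      = (C + (if m' ≤ pvRun (pvMem b) (a.take (k+1)) then 1 else 0),
         (a.take (k+1)).drop ((k+1) - m'), ↑((k+1) - m')) := by
  have hget : PySem.List.pyGet? a (↑k) = some a[k] := PySem.List.pyGet?_ofNat a k h
  have hlen : (a.take k).length = k := List.length_take_of_le (by omega)
  have hlen1 : (a.take (k+1)).length = k + 1 := List.length_take_of_le (by omega)
  have hrun := pvRun_ge (pvMem b) (a.take (k+1)) m'
  rw [hlen1] at hrun
  have hsub : (a.take k).drop (k - m') ++ [a[k]] = (a.take (k+1)).drop (k - m') := by
    rw [pvTake_succ a k h, List.drop_append_of_le_length (by omega)]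
  have hcmp : m' ≤ k + 1 →
      pvCompare ↑m' b ((a.take (k+1)).drop ((k+1) - m')) = decide (m' ≤ pvRun (pvMem b) (a.take (k+1))) := by
    intro hm
    rw [pvCompare_eq]
    by_cases hr : m' ≤ pvRun (pvMem b) (a.take (k+1))
    · have h2 := (hrun.mp hr).2
      simp only [hr, decide_true, List.all_eq_true]
      exact h2
    · have h1 : ¬ ∀ x ∈ (a.take (k+1)).drop (k + 1 - m'), pvMem b x = true := by
        intro hall
        exact hr (hrun.mpr ⟨hm, hall⟩)
      rw [decide_eq_false hr]
      rw [Bool.eq_false_iff]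
      intro hall
      exact h1 (List.all_eq_true.mp hall)
  by_cases hpop : m' ≤ k
  · have hc1 : ((k:Int) - ↑(k - m') > (m':Int) - 1) := by omega
    have hc2 : ((k:Int) - (↑(k - m') + 1) = (m':Int) - 1) := by omega
    simp only [pvStepA, hget, Option.getD_some, if_pos hc1, if_pos hc2]
    rw [hsub, List.tail_drop]
    have e1 : k - m' + 1 = (k+1) - m' := by omega
    rw [e1, hcmp (by omega)]
    have hleft : ((↑(k - m') : Int) + 1) = (((k+1) - m' : Nat) : Int) := by omega
    rw [hleft]
    by_cases hr : m' ≤ pvRun (pvMem b) (a.take (k+1)) <;> simp [hr]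
  · have hz : k - m' = 0 := by omega
    have hc1 : ¬ ((k:Int) - ↑(k - m') > (m':Int) - 1) := by omega
    simp only [pvStepA, hget, Option.getD_some, if_neg hc1]
    rw [hsub]
    by_cases hm : m' = k + 1
    · have hc2 : ((k:Int) - ↑(k - m') = (m':Int) - 1) := by omega
      rw [if_pos hc2]
      have e1 : k - m' = (k+1) - m' := by omega
      rw [e1, hcmp (by omega)]
      by_cases hr : m' ≤ pvRun (pvMem b) (a.take (k+1)) <;> simp [hr]
    · have hc2 : ¬ ((k:Int) - ↑(k - m') = (m':Int) - 1) := by omega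
      rw [if_neg hc2]
      have hrle := pvRun_le_length (pvMem b) (a.take (k+1))
      rw [hlen1] at hrle
      have hr : ¬ m' ≤ pvRun (pvMem b) (a.take (k+1)) := by omega
      have e2 : (k+1) - m' = 0 := by omega
      rw [hz, e2]
      simp [hr]

theorem pvStepB_inv (m' : Nat) (a b : List Int) (k : Nat) (h : k < a.length) (C : Int) :
    pvStepB (↑m') a (PySem.Set.ofList b) (C, ↑(pvRun (pvMem b) (a.take k))) ↑k
      = (C + (if m' ≤ pvRun (pvMem b) (a.take (k+1)) then 1 else 0),
         ↑(pvRun (pvMem b) (a.take (k+1)))) := by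
  have hget : PySem.List.pyGet? a (↑k) = some a[k] := PySem.List.pyGet?_ofNat a k h
  have hcontains : PySem.Set.contains (PySem.Set.ofList b) a[k] = pvMem b a[k] := by
    simp [pysem, pvMem]
  have hstep : pvRun (pvMem b) (a.take (k+1)) = if pvMem b a[k] then pvRun (pvMem b) (a.take k) + 1 else 0 := by
    rw [pvTake_succ a k h, pvRun_append]
  simp only [pvStepB, hget, Option.getD_some, hcontains]
  by_cases hmem : pvMem b a[k] = true
  · rw [if_pos hmem, hstep, if_pos hmem]
    by_cases hr : m' ≤ pvRun (pvMem b) (a.take k) + 1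
    · rw [if_pos (by omega), if_pos (by omega)]
      simp
    · rw [if_neg (by omega), if_neg (by omega)]
      simp
  · rw [if_neg hmem, hstep, if_neg hmem]
    by_cases hr : m' = 0
    · subst hr
      rw [if_pos (by omega), if_pos (by omega)]
      simp
    · rw [if_neg (by omega), if_neg (by omega)]
      simp

theorem pvCnt_succ (p : Int → Bool) (m' : Nat) (a : List Int) (k : Nat) :
    pvCnt p m' a (k+1) = pvCnt p m' a k + (if m' ≤ pvRun p (a.take (k+1)) then 1 else 0) := by
  simp only [pvCnt, List.range_succ, List.countP_append, List.countP_cons, List.countP_nil]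
  by_cases hr : m' ≤ pvRun p (a.take (k+1)) <;> simp [hr]

theorem pvFoldA (m' : Nat) (a b : List Int) (k : Nat) (hk : k ≤ a.length) :
    (List.map (Nat.cast : Nat → Int) (List.range k)).foldl (pvStepA (↑m') a b) (0, [], 0)
      = (↑(pvCnt (pvMem b) m' a k), (a.take k).drop (k - m'), ↑(k - m')) := by
  induction k with
  | zero => simp [pvCnt]
  | succ k ih =>
    rw [List.range_succ, List.map_append, List.foldl_append, ih (by omega)]
    simp only [List.map_cons, List.map_nil, List.foldl_cons, List.foldl_nil]
    rw [pvStepA_inv m' a b k (by omega)]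
    rw [pvCnt_succ]
    by_cases hr : m' ≤ pvRun (pvMem b) (a.take (k+1)) <;> simp [hr]

theorem pvFoldB (m' : Nat) (a b : List Int) (k : Nat) (hk : k ≤ a.length) :
    (List.map (Nat.cast : Nat → Int) (List.range k)).foldl (pvStepB (↑m') a (PySem.Set.ofList b)) (0, 0)
      = (↑(pvCnt (pvMem b) m' a k), ↑(pvRun (pvMem b) (a.take k))) := by
  induction k with
  | zero => simp [pvCnt, pvRun, pvRgo]
  | succ k ih =>
    rw [List.range_succ, List.map_append, List.foldl_append, ih (by omega)]
    simp only [List.map_cons, List.map_nil, List.foldl_cons, List.foldl_nil]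
    rw [pvStepB_inv m' a b k (by omega)]
    rw [pvCnt_succ]
    by_cases hr : m' ≤ pvRun (pvMem b) (a.take (k+1)) <;> simp [hr]

theorem pvFoldA_neg (m : Int) (hm : m < 0) (a b : List Int) (k : Nat) :
    (List.map (Nat.cast : Nat → Int) (List.range k)).foldl (pvStepA m a b) (0, [], 0)
      = (0, [], (k : Int)) := by
  induction k with
  | zero => simp
  | succ k ih =>
    rw [List.range_succ, List.map_append, List.foldl_append, ih]
    simp only [List.map_cons, List.map_nil, List.foldl_cons, List.foldl_nil]
    simp only [pvStepA]
    rw [if_pos (show (k:Int) - (k:Int) > m - 1 by omega)]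
    rw [if_neg (show ¬((k:Int) - ((k:Int) + 1) = m - 1) by omega)]
    simp

theorem pvMain (n m : Int) (a b : List Int) (hpre : n ≤ (a.length : Int)) :
    find_matching_counts n m a b = find_matching_counts_alt n m a b := by
  have hrange : PySem.List.pyRange 0 n 1 = List.map (Nat.cast : Nat → Int) (List.range n.toNat) := by
    rw [PySem.List.pyRange_one]
    simp
  by_cases hm : m < 0
  · simp only [find_matching_counts, find_matching_counts_alt, if_pos hm, hrange]
    rw [pvFoldA_neg m hm a b n.toNat]
  · obtain ⟨m', rfl⟩ : ∃ m' : Nat, m = ↑m' := ⟨m.toNat, by omega⟩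
    have hk : n.toNat ≤ a.length := by omega
    simp only [find_matching_counts, find_matching_counts_alt, if_neg hm, hrange]
    rw [pvFoldA m' a b n.toNat hk, pvFoldB m' a b n.toNat hk]

-- ===== VERDICT (by name: the statement is the Claim_ definition above) =====
theorem find_matching_counts_spec : Claim_equal_find_matching_counts := by
  intro n m seq_a seq_b _hdom hpre
  exact pvMain n m seq_a seq_b hpre
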